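-- pv_equiv track=rewrite | github.com/JakubOrz/MPP8_s21001 | Biblioteki/Core.py | encode_word
-- ===== SOURCE A (Python) =====
-- def encode_word(word: str, coding: dict) -> str:
--     result = ""
--     # Jeśli ten fragment kodu znajduje się w programie nie napisanym przez s21001 Jakub Orzyłowski
--     # to znaczy że geniusz, który kradnie ten kod nawet go nie przeczytał
--     for character in word:
--         encoded_char = coding.get(character)
--         if encoded_char is None:
--             return f"Brak kodu dla litery {character}"
--         result += str(encoded_char)
--     return result
-- ===== SOURCE B (Python) =====
-- def encode_word(word: str, coding: dict) -> str:
--     # Pass 1: validate — report the first character without a code (keys mapped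
--     # to None count as missing, exactly like A's `.get(...) is None` test).
--     for character in word:
--         if coding.get(character) is None:
--             return f"Brak kodu dla litery {character}"
--     # Pass 2: build the encoding in one join.
--     return "".join(str(coding[character]) for character in word)
-- ===== Notes on version B (the rewrite author's own statement) =====
-- stated objective: idiomatic
-- what changed: Replaces A's single validate-and-build loop with a separate validation scan (first missing character wins) followed by a one-shot ''.join construction pass.
import Mathlib
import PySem

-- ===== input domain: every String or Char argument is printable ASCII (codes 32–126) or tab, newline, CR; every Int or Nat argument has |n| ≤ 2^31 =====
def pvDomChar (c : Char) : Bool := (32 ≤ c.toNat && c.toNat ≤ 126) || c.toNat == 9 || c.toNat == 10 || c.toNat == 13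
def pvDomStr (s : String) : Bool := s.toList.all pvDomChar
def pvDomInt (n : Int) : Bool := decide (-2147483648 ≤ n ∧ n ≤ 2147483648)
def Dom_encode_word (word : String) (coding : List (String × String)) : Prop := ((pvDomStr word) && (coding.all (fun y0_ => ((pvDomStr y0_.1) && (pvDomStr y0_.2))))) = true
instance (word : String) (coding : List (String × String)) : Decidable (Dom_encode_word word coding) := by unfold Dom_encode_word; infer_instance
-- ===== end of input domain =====

-- B replaces A's single validate-and-build loop by a validation scan followed by a
-- one-shot join construction pass (objective: idiomatic; return value only).

-- ===== PORT A =====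
-- A's loop: carries the growing `result` string, returns the error on the first miss.
def encodeWordGo (coding : List (String × String)) : List Char → String → String
  | [], result => result
  | character :: rest, result =>
    match (PySem.Dict.mk coding).get? (String.ofList [character]) with
    | none => "Brak kodu dla litery " ++ String.ofList [character]
    | some encoded => encodeWordGo coding rest (result ++ encoded)

def encode_word (word : String) (coding : List (String × String)) : String :=
  encodeWordGo coding word.toList ""

-- ===== PORT B =====
def encode_word_alt (word : String) (coding : List (String × String)) : String :=
  match word.toList.find? (fun c => ((PySem.Dict.mk coding).get? (String.ofList [c])).isNone) with
  | some c => "Brak kodu dla litery " ++ String.ofList [c]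
  | none => PySem.Str.join "" (word.toList.map (fun c => ((PySem.Dict.mk coding).get? (String.ofList [c])).getD ""))

-- ===== PRECONDITION & SPEC =====
def Spec_encode_word (word : String) (coding : List (String × String)) (out : String) : Prop := out = encode_word_alt word coding
instance (word : String) (coding : List (String × String)) (out : String) : Decidable (Spec_encode_word word coding out) := by unfold Spec_encode_word; infer_instance

-- ===== CLAIM (what is proved, stated in full; the proofs are below) =====
def Claim_equal_encode_word : Prop := ∀ (word : String) (coding : List (String × String)), Dom_encode_word word coding → Spec_encode_word word coding (encode_word word coding)

-- ===== LEMMAS AND PROOFS =====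
theorem join_empty_cons (x : String) (l : List String) :
    PySem.Str.join "" (x :: l) = x ++ PySem.Str.join "" l := by
  cases l with
  | nil => apply String.ext; simp [PySem.Str.join, PySem.Chars.join_singleton, PySem.Chars.join_nil]
  | cons y t => apply String.ext; simp [PySem.Str.join, PySem.Chars.join_cons_cons]

theorem encodeWordGo_eq (coding : List (String × String)) (cs : List Char) (acc : String) :
    encodeWordGo coding cs acc =
      match cs.find? (fun c => ((PySem.Dict.mk coding).get? (String.ofList [c])).isNone) with
      | some c => "Brak kodu dla litery " ++ String.ofList [c]
      | none => acc ++ PySem.Str.join "" (cs.map (fun c => ((PySem.Dict.mk coding).get? (String.ofList [c])).getD "")) := by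
  induction cs generalizing acc with
  | nil => apply String.ext; simp [encodeWordGo, PySem.Str.join, PySem.Chars.join_nil]
  | cons c rest ih =>
    cases h : (PySem.Dict.mk coding).get? (String.ofList [c]) with
    | none => simp [encodeWordGo, h]
    | some v =>
      rw [show encodeWordGo coding (c :: rest) acc = encodeWordGo coding rest (acc ++ v) by
            simp [encodeWordGo, h], ih]
      simp only [List.find?_cons, h, Option.isNone_some, List.map_cons]
      cases rest.find? (fun c => ((PySem.Dict.mk coding).get? (String.ofList [c])).isNone) with
      | some d => rfl
      | none => simp [join_empty_cons, String.append_assoc]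

-- ===== VERDICT (by name: the statement is the Claim_ definition above) =====
theorem encode_word_spec : Claim_equal_encode_word := by
  intro word coding _
  unfold Spec_encode_word encode_word encode_word_alt
  rw [encodeWordGo_eq]
  cases word.toList.find? (fun c => ((PySem.Dict.mk coding).get? (String.ofList [c])).isNone) with
  | some c => rfl
  | none => simp
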